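-- pv_equiv track=rewrite | github.com/divyapodila/5143-OS-101 | Assignments/P01/cmd_pkg/cmdLs.py | colprint
-- ===== SOURCE A (Python) =====
-- def columnify(iterable):
--     # First convert everything to its repr
--     strings = [repr(x) for x in iterable]
--     # Now pad all the strings to match the widest
--     widest = max(len(x) for x in strings)
--     padded = [x.ljust(widest) for x in strings]
--     return padded
--
-- def colprint(iterable, width=72):
--     output=""
--     columns = columnify(iterable)
--     colwidth = len(columns[0])+2
--     perline = (width-4) // colwidth
--
--     for i, column in enumerate(columns):
--         output+=column+" "
--
--         if i % perline == perline-1: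
--             output+="\n"
--
--     output+="\n"
--     return output
-- ===== SOURCE B (Python) =====
-- def columnify(iterable):
--     # First convert everything to its repr
--     strings = [repr(x) for x in iterable]
--     # Now pad all the strings to match the widest
--     widest = max(len(x) for x in strings)
--     padded = [x.ljust(widest) for x in strings]
--     return padded
--
-- def colprint(iterable, width=72):
--     columns = columnify(iterable)
--     colwidth = len(columns[0]) + 2
--     perline = (width - 4) // colwidth
--     if perline <= 0:
--         # width too small to fit even one column: emit a single unwrapped line
--         return "".join(c + " " for c in columns) + "\n"
--     pieces = []
--     while len(columns) >= perline:
--         row, columns = columns[:perline], columns[perline:]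
--         pieces.append("".join(c + " " for c in row) + "\n")
--     pieces.append("".join(c + " " for c in columns))
--     return "".join(pieces) + "\n"
-- ===== Notes on version B (the rewrite author's own statement) =====
-- stated objective: alternative
-- what changed: colprint builds the output row by row, slicing perline-sized rows off the column list in a while loop (full rows newline-terminated, the remainder terminated by the final newline), with a single unwrapped line when fewer than one column fits, instead of A's flat enumerate loop with a modulo-counter newline test; Pre_ excludes only inputs where A raises (empty iterable: ValueError from max(); perline == 0: ZeroDivisionError from i % perline).
-- crash fix: When the iterable is nonempty and (width-4)//colwidth == 0, A raises ZeroDivisionError on 'i % perline'; B returns all columns on a single unwrapped line. — e.g. on colprint(["a"], 4): A raises ZeroDivisionError, B returns "'a' \n"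
import Mathlib
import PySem

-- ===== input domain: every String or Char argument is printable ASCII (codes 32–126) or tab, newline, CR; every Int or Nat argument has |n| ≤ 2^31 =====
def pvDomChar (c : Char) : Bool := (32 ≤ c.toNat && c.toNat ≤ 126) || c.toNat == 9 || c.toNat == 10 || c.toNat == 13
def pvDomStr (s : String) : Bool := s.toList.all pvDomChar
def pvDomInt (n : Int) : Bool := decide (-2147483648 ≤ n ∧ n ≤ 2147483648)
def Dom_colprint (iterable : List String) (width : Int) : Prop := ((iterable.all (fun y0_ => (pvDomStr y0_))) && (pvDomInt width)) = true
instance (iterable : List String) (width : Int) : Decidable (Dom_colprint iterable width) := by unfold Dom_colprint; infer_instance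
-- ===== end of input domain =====

-- B builds the output row by row, slicing perline-sized rows off the column list (a single
-- unwrapped line when fewer than one column fits), instead of A's flat loop with a modulo
-- counter; Pre_ excludes only inputs where A raises, and B returns where A's i % 0 raises.


-- ===== PORT A =====
-- repr(x) for a str x; exact on Dom's character set (printable ASCII, tab, newline, CR):
-- quote is ' unless the string contains ' and no ", and only \, the quote, \t, \n, \r escape.
def reprEscape (q c : Char) : List Char :=
  if c = '\\' then ['\\', '\\']
  else if c = q then ['\\', q]
  else if c = '\t' then ['\\', 't']
  else if c = '\n' then ['\\', 'n']
  else if c = '\r' then ['\\', 'r']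
  else [c]

def reprChars (cs : List Char) : List Char :=
  let q := if cs.contains '\'' && !(cs.contains '"') then '"' else '\''
  q :: cs.flatMap (reprEscape q) ++ [q]

-- columnify (shared by Source A and Source B verbatim): reprs, then every string padded (ljust) to
-- the widest; Python's max raises ValueError on an empty iterable (excluded by Pre_).
def columnify (iterable : List String) : List (List Char) :=
  let strings := iterable.map (fun x => reprChars x.toList)
  let widest := (strings.map List.length).foldl max 0
  strings.map (fun x => x ++ List.replicate (widest - x.length) ' ')

-- one step of A's `for i, column in enumerate(columns)` loop; state = (output, i)
def colStep (perline : Int) (st : List Char × Int) (column : List Char) : List Char × Int :=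
  let output := st.1 ++ column ++ [' ']
  let output := if PySem.Int.mod st.2 perline = perline - 1 then output ++ ['\n'] else output
  (output, st.2 + 1)

def colprint (iterable : List String) (width : Int) : String :=
  let columns := columnify iterable
  let colwidth : Int := ((PySem.List.pyGetD columns 0 []).length : Int) + 2
  let perline := PySem.Int.floordiv (width - 4) colwidth
  let res := columns.foldl (colStep perline) ([], 0)
  String.ofList (res.1 ++ ['\n'])

-- ===== PORT B =====
-- Source B's while loop: while at least perline columns remain, slice a full row off the front
-- and emit it with a trailing newline; the remaining columns form the last (unterminated)
-- piece. Called with Pm1 = perline - 1 (perline ≥ 1 is guaranteed by the caller's guard).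
def rowsB (Pm1 : Nat) (cs : List (List Char)) : List Char :=
  if Pm1 + 1 ≤ cs.length then
    (cs.take (Pm1 + 1)).foldl (fun a c => a ++ c ++ [' ']) [] ++ ['\n']
      ++ rowsB Pm1 (cs.drop (Pm1 + 1))
  else cs.foldl (fun a c => a ++ c ++ [' ']) []
  termination_by cs.length
  decreasing_by simp; omega

def colprint_alt (iterable : List String) (width : Int) : String :=
  let columns := columnify iterable
  let colwidth : Int := ((PySem.List.pyGetD columns 0 []).length : Int) + 2
  let perline := PySem.Int.floordiv (width - 4) colwidth
  if perline ≤ 0 then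
    String.ofList (columns.foldl (fun a c => a ++ c ++ [' ']) [] ++ ['\n'])
  else String.ofList (rowsB (perline.toNat - 1) columns ++ ['\n'])

-- ===== PRECONDITION & SPEC =====
-- Pre_ excludes exactly the inputs where A raises: empty iterables (max() raises ValueError)
-- and widths making perline == 0 (i % 0 raises ZeroDivisionError).
def Pre_colprint (iterable : List String) (width : Int) : Prop :=
  iterable ≠ [] ∧
  PySem.Int.floordiv (width - 4)
      (((iterable.map (fun s => (reprChars s.toList).length)).foldl max 0 : Nat) + 2) ≠ 0
instance (iterable : List String) (width : Int) : Decidable (Pre_colprint iterable width) := by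
  unfold Pre_colprint; infer_instance

def pvWitness_colprint : List String × Int := (["a", "bb"], 20)

-- When the iterable is nonempty and (width-4)//colwidth == 0, A raises ZeroDivisionError on
-- 'i % perline'; B returns all columns on a single unwrapped line.
def Raises_colprint (iterable : List String) (width : Int) : Prop :=
  iterable ≠ [] ∧
  PySem.Int.floordiv (width - 4)
      (((iterable.map (fun s => (reprChars s.toList).length)).foldl max 0 : Nat) + 2) = 0
instance (iterable : List String) (width : Int) : Decidable (Raises_colprint iterable width) := by
  unfold Raises_colprint; infer_instance

def pvRaiseWitness_colprint : List String × Int := (["a"], 4)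
def pvRaiseWitnessOut_colprint : String := "'a' \n"

def Spec_colprint (iterable : List String) (width : Int) (out : String) : Prop := out = colprint_alt iterable width
instance (iterable : List String) (width : Int) (out : String) : Decidable (Spec_colprint iterable width out) := by unfold Spec_colprint; infer_instance

-- ===== CLAIM (what is proved, stated in full; the proofs are below) =====
def Claim_equal_colprint : Prop := ∀ (iterable : List String) (width : Int), Dom_colprint iterable width → Pre_colprint iterable width → Spec_colprint iterable width (colprint iterable width)
def Claim_raises_colprint : Prop := (∀ (iterable : List String) (width : Int), Dom_colprint iterable width → Raises_colprint iterable width → ¬ Pre_colprint iterable width) ∧ (Dom_colprint (pvRaiseWitness_colprint.1) (pvRaiseWitness_colprint.2) ∧ Raises_colprint (pvRaiseWitness_colprint.1) (pvRaiseWitness_colprint.2) ∧ colprint_alt (pvRaiseWitness_colprint.1) (pvRaiseWitness_colprint.2) = pvRaiseWitnessOut_colprint)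

-- ===== LEMMAS AND PROOFS =====

-- pyGetD at index 0 of a nonempty list is its head
theorem pyGetD_zero_cons' (y : List Char) (l : List (List Char)) :
    PySem.List.pyGetD (y :: l) 0 [] = y := by
  simp [pysem]

-- appending to the accumulator of the join-fold factors out
theorem foldl_app (l : List (List Char)) (a b : List Char) :
    List.foldl (fun acc c => acc ++ c ++ [' ']) (a ++ b) l
      = a ++ List.foldl (fun acc c => acc ++ c ++ [' ']) b l := by
  induction l generalizing b with
  | nil => rfl
  | cons x xs ih =>
      simp only [List.foldl_cons]
      rw [show a ++ b ++ x ++ [' '] = a ++ (b ++ x ++ [' ']) by simp [List.append_assoc]]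
      exact ih _

-- one row of A's loop (perline = P > 0): while the counter stays inside a single row,
-- colStep just joins, and the newline fires exactly when the row is completed
theorem foldl_colStep_row (P : Nat) (hP : 0 < P) :
    ∀ (chunk : List (List Char)) (n : Nat) (acc : List Char),
      n % P + chunk.length ≤ P →
      List.foldl (colStep (P : Int)) (acc, (n : Int)) chunk
        = (acc ++ chunk.foldl (fun a c => a ++ c ++ [' ']) [] ++
            (if n % P + chunk.length = P then ['\n'] else []),
           ((n + chunk.length : Nat) : Int)) := by
  intro chunk
  induction chunk with
  | nil =>
      intro n acc _
      have hlt := Nat.mod_lt n hP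
      simp [Nat.ne_of_lt hlt]
  | cons c rest ih =>
      intro n acc h
      have h2 : n % P < P := Nat.mod_lt n hP
      simp only [List.foldl_cons, colStep, PySem.Int.mod_natCast]
      by_cases hfire : n % P + 1 = P
      · have hrest : rest = [] := by
          cases rest with
          | nil => rfl
          | cons r rs => exfalso; simp at h; omega
        subst hrest
        have hcond : ((n % P : Nat) : Int) = (P : Int) - 1 := by omega
        simp only [hcond, List.foldl_nil]
        simp [hfire]
      · have hcond : ¬ (((n % P : Nat) : Int) = (P : Int) - 1) := by
          intro hc; exact hfire (by omega)
        simp only [hcond, if_false]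
        have hlen : n % P + 1 < P := by simp at h; omega
        rw [show ((n : Int) + 1) = ((n + 1 : Nat) : Int) by push_cast; ring]
        have hstep : (n + 1) % P = n % P + 1 := by
          have h1 : 1 % P = 1 := Nat.mod_eq_of_lt (by omega)
          have hsum : n % P + 1 % P < P := by omega
          rw [Nat.add_mod_of_add_mod_lt hsum, h1]
        rw [ih (n + 1) (acc ++ c ++ [' ']) (by simp at h ⊢; omega)]
        rw [hstep]
        have hlencons : (c :: rest).length = rest.length + 1 := rfl
        rw [hlencons]
        have e1 : n % P + 1 + rest.length = n % P + (rest.length + 1) := by omega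
        have e2 : n + 1 + rest.length = n + (rest.length + 1) := by omega
        rw [e1, e2]
        rw [show ([] : List Char) ++ c ++ [' '] = (c ++ [' ']) ++ [] by simp]
        rw [foldl_app rest (c ++ [' ']) []]
        simp [List.append_assoc]

-- main loop lemma: starting at a row boundary, A's flat loop equals B's row recursion
theorem foldl_colStep_rows (P : Nat) (hP : 0 < P) :
    ∀ (L : Nat) (cs : List (List Char)), cs.length ≤ L →
      ∀ (n : Nat) (acc : List Char), n % P = 0 →
      (List.foldl (colStep (P : Int)) (acc, (n : Int)) cs).1
        = acc ++ rowsB (P - 1) cs := by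
  intro L
  induction L with
  | zero =>
      intro cs hcs n acc hn
      have hcs0 : cs = [] := List.eq_nil_of_length_eq_zero (by omega)
      subst hcs0
      rw [rowsB]
      rw [if_neg (by simp)]
      simp
  | succ L ihL =>
      intro cs hcs n acc hn
      rw [rowsB]
      have hP1 : P - 1 + 1 = P := by omega
      rw [hP1]
      by_cases hfull : P ≤ cs.length
      · rw [if_pos hfull]
        have hsplit : cs = cs.take P ++ cs.drop P := by simp
        conv_lhs => rw [hsplit, List.foldl_append]
        have htl : (cs.take P).length = P := by simp; omega
        rw [foldl_colStep_row P hP _ n acc (by omega)]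
        have hcond : n % P + (cs.take P).length = P := by omega
        rw [if_pos hcond]
        have hmod : (n + (cs.take P).length) % P = 0 := by
          rw [htl, Nat.add_mod_right]; exact hn
        rw [ihL (cs.drop P) (by simp; omega) _ _ hmod]
        simp [List.append_assoc]
      · rw [if_neg hfull]
        have hle : n % P + cs.length ≤ P := by omega
        rw [foldl_colStep_row P hP cs n acc hle]
        have hcond : ¬ (n % P + cs.length = P) := by omega
        simp [hcond]

-- the first padded column's length is the widest repr length (nonempty input)
theorem columnify_head_len (iterable : List String) (h : iterable ≠ []) :
    (PySem.List.pyGetD (columnify iterable) 0 []).length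
      = (iterable.map (fun s => (reprChars s.toList).length)).foldl max 0 := by
  obtain ⟨x, xs, rfl⟩ := List.exists_cons_of_ne_nil h
  simp only [columnify, List.map_cons, List.foldl_cons, List.map_map, Function.comp_def,
    pyGetD_zero_cons']
  have hle := (PySem.List.le_foldl_max (xs.map (fun s => (reprChars s.toList).length))
      (max 0 (reprChars x.toList).length)).1
  set M := List.foldl max (max 0 (reprChars x.toList).length)
      (xs.map (fun s => (reprChars s.toList).length)) with hM
  simp [List.length_append]
  omega

-- negative perline: the modulo test of A never fires (mod keeps the divisor's sign)
theorem foldl_colStep_neg (perline : Int) (hneg : perline < 0) :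
    ∀ (cs : List (List Char)) (acc : List Char) (i : Int),
      List.foldl (colStep perline) (acc, i) cs
        = (acc ++ cs.foldl (fun a c => a ++ c ++ [' ']) [], i + cs.length) := by
  intro cs
  induction cs with
  | nil => intro acc i; simp
  | cons c rest ih =>
      intro acc i
      have hb := PySem.Int.mod_neg_bounds (a := i) hneg
      have hcond : ¬ (PySem.Int.mod i perline = perline - 1) := by omega
      simp only [List.foldl_cons, colStep, hcond, if_false]
      rw [ih]
      rw [show ([] : List Char) ++ c ++ [' '] = (c ++ [' ']) ++ [] by simp]
      rw [foldl_app rest (c ++ [' ']) []]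
      simp [List.append_assoc]
      omega

-- ===== VERDICT (by name: the statement is the Claim_ definition above) =====
theorem colprint_spec : Claim_equal_colprint := by
  intro iterable width _ hpre
  obtain ⟨hne, hperline⟩ := hpre
  have hhead := columnify_head_len iterable hne
  unfold Spec_colprint
  simp only [colprint, colprint_alt, hhead]
  set W : Nat := (iterable.map (fun s => (reprChars s.toList).length)).foldl max 0 with hW
  set perline : Int := PySem.Int.floordiv (width - 4) ((W : Int) + 2) with hperdef
  rcases lt_or_gt_of_ne hperline with hneg | hpos
  · rw [if_pos (by omega : perline ≤ 0)]
    congr 1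
    rw [foldl_colStep_neg perline hneg]
    simp
  · rw [if_neg (by omega : ¬ perline ≤ 0)]
    congr 1
    congr 1
    have hPeq : perline = ((perline.toNat : Nat) : Int) := by omega
    conv_lhs => rw [hPeq]
    have h := foldl_colStep_rows perline.toNat (by omega) (columnify iterable).length
        (columnify iterable) (le_refl _) 0 [] (by simp)
    rw [List.nil_append] at h
    exact_mod_cast h

-- crash-fix verdict: A raises where Raises_ holds, B returns the witness value there
@[simp]
theorem colprint_raises : Claim_raises_colprint := by
  unfold Claim_raises_colprint
  refine ⟨?_, by decide⟩
  intro iterable width _ hr hp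
  exact hp.2 hr.2
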